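-- pv_equiv track=rewrite | github.com/ndreey/ProteinTailor | protein_tailor/tailor_tools/final_fit_tools.py | false_initiation
-- ===== SOURCE A (Python) =====
-- def false_initiation(sd_site, rogues):
--     """Finds SD sites that are to close to start codons that are in
--     risk of causing a false initiation of translation.
--
--     Args:
--         sd_site (list): list of sd sites start index
--         rogues (list): positions of rogue start codons
--
--     Returns:
--         list: list of SD positions that are to close to a start codon
--     """
--     false_inits = []
--     # Check to see if each start is 6-12 nt downstram from each sd site
--     for sd in sd_site:
--         for pos in rogues:
--             # If sd site is (12 or 6) nt downstream of start codon.
--             if -6 >= sd-pos >= -12: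
--                 # Add to false initiation
--                 false_inits.append(sd)
--                 # No need to continue checking this sd, so we break
--                 break
--             else:
--                 pass
--
--     return false_inits
-- ===== SOURCE B (Python) =====
-- def false_initiation(sd_site, rogues):
--     """Same result as A: SD sites with some rogue start codon 6-12 nt downstream.
--
--     Builds the set of all "dangerous" SD positions (pos - 6 .. pos - 12 for each
--     rogue) once, then filters sd_site by O(1) set membership.
--     """
--     danger = {pos - d for pos in rogues for d in range(6, 13)}
--     return [sd for sd in sd_site if sd in danger]
-- ===== Notes on version B (the rewrite author's own statement) =====
-- stated objective: faster
-- what changed: A scans all rogues for every SD site; B precomputes the set of the 7 dangerous SD positions per rogue once and filters sd_site by hash-set membership, removing the inner scan.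
import Mathlib
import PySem

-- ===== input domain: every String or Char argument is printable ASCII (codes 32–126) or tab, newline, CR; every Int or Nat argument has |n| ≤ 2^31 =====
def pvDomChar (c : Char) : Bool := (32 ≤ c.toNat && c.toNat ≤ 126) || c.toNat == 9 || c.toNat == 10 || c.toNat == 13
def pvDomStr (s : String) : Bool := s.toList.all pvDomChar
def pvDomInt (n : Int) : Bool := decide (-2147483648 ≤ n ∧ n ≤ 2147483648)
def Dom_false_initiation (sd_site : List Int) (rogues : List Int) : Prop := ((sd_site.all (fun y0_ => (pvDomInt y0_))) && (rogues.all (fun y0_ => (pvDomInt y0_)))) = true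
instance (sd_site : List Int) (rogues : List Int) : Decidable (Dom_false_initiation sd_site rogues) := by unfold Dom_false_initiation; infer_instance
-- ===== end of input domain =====

-- B replaces A's inner scan over all rogues by one precomputed set of dangerous SD positions (faster: O(n*m) → O(n+m)).

-- ===== PORT A =====
-- inner 'for pos in rogues: if … : append; break' — returns whether the loop appended sd
def fiInner (sd : Int) : List Int → Bool
  | [] => false
  | pos :: rest => if (-6 : Int) ≥ sd - pos ∧ sd - pos ≥ -12 then true else fiInner sd rest

def false_initiation (sd_site : List Int) (rogues : List Int) : List Int :=
  sd_site.foldl (fun false_inits sd =>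
    if fiInner sd rogues then false_inits ++ [sd] else false_inits) []

-- ===== PORT B =====
def false_initiation_alt (sd_site : List Int) (rogues : List Int) : List Int :=
  let danger := PySem.Set.ofList (rogues.flatMap (fun pos => (PySem.List.pyRange 6 13 1).map (fun d => pos - d)))
  sd_site.filter (fun sd => PySem.Set.contains danger sd)

-- ===== PRECONDITION & SPEC =====
def Spec_false_initiation (sd_site : List Int) (rogues : List Int) (out : List Int) : Prop := out = false_initiation_alt sd_site rogues
instance (sd_site : List Int) (rogues : List Int) (out : List Int) : Decidable (Spec_false_initiation sd_site rogues out) := by unfold Spec_false_initiation; infer_instance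

-- ===== CLAIM (what is proved, stated in full; the proofs are below) =====
def Claim_equal_false_initiation : Prop := ∀ (sd_site : List Int) (rogues : List Int), Dom_false_initiation sd_site rogues → Spec_false_initiation sd_site rogues (false_initiation sd_site rogues)

-- ===== LEMMAS AND PROOFS =====

-- A's inner loop finds a rogue 6-12 nt downstream iff one exists
theorem fiInner_iff (sd : Int) (rogues : List Int) :
    fiInner sd rogues = true ↔ ∃ pos ∈ rogues, (-6 : Int) ≥ sd - pos ∧ sd - pos ≥ -12 := by
  induction rogues with
  | nil => simp [fiInner]
  | cons p rest ih =>
    simp only [fiInner]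
    split_ifs with h
    · simp only [true_iff]
      exact ⟨p, by simp, h⟩
    · rw [ih]
      constructor
      · rintro ⟨pos, hpos, hc⟩; exact ⟨pos, by simp [hpos], hc⟩
      · rintro ⟨pos, hpos, hc⟩
        rcases List.mem_cons.mp hpos with rfl | hm
        · exact absurd hc h
        · exact ⟨pos, hm, hc⟩

-- B's membership test is the same condition
theorem danger_mem_iff (sd : Int) (rogues : List Int) :
    PySem.Set.contains (PySem.Set.ofList (rogues.flatMap (fun pos => (PySem.List.pyRange 6 13 1).map (fun d => pos - d)))) sd = true ↔
    ∃ pos ∈ rogues, (-6 : Int) ≥ sd - pos ∧ sd - pos ≥ -12 := by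
  rw [PySem.Set.contains_iff, PySem.Set.mem_ofList]
  simp only [List.mem_flatMap, List.mem_map, PySem.List.mem_pyRange_one]
  constructor
  · rintro ⟨pos, hpos, d, ⟨h6, h13⟩, rfl⟩
    exact ⟨pos, hpos, by omega⟩
  · rintro ⟨pos, hpos, h1, h2⟩
    exact ⟨pos, hpos, pos - sd, by omega, by omega⟩

theorem false_initiation_spec : Claim_equal_false_initiation := by
  intro sd_site rogues _
  unfold Spec_false_initiation false_initiation false_initiation_alt
  rw [PySem.List.foldl_append_if_eq_filter]
  simp only [List.nil_append]
  apply List.filter_congr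
  intro sd _
  rw [Bool.eq_iff_iff, fiInner_iff, danger_mem_iff]
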